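-- pv_equiv track=rewrite | github.com/ZhalfaHabibi/Hello-Project---1303210007-Zhalfa-Habibi-Nainggolan | Main_1303210007.py | juara
-- ===== SOURCE A (Python) =====
-- def juara(daftar_pemain: dict, action: int):
--     # list utk menyimpan pemenang jika ada yang poinnya sama dan
--     # mereka yang merupakan pemilik poin paling tinggi
--     kandidat_pemenang = []
--
--     # cari poin tertinggi bila action = 1
--     if action == 1:
--         poin_diminta = max(daftar_pemain.values())
--     # sebaliknya cari poin terendah bila action = 2
--     else:
--         poin_diminta = min(daftar_pemain.values())
--
--     # for loop untuk mengecek setiap pemain dan poin mereka. bila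
--     # poin sama dengan variable poin_tertinggi maka append ke list
--     for personnel in daftar_pemain.items():
--         if personnel[-1] == poin_diminta:
--             kandidat_pemenang.append(personnel)
--
--     # return list
--     return kandidat_pemenang
-- ===== SOURCE B (Python) =====
-- def juara(daftar_pemain: dict, action: int):
--     # single pass: keep the current best value and the candidate list
--     best = None
--     kandidat = []
--     for k, v in daftar_pemain.items():
--         if best is None or (best < v if action == 1 else v < best):
--             best = v
--             kandidat = [(k, v)]
--         elif v == best:
--             kandidat.append((k, v))
--     if best is None:
--         raise ValueError("empty dict")
--     return kandidat
-- ===== Notes on version B (the rewrite author's own statement) =====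
-- stated objective: alternative
-- what changed: Replaces A's two passes (max/min over values, then a filter pass) by a single loop over items() that maintains the running extremum and resets/extends the candidate list.
import Mathlib
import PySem

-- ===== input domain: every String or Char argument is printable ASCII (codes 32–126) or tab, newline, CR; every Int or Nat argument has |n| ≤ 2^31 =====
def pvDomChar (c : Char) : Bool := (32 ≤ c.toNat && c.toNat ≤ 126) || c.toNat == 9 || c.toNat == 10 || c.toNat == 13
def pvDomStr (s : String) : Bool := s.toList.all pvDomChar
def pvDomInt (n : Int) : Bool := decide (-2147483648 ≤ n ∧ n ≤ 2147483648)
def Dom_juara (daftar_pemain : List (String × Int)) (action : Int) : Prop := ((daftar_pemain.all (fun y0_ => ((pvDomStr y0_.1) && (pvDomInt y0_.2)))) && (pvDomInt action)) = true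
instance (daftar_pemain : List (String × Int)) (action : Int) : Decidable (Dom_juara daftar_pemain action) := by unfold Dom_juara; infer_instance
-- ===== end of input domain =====

-- B replaces A's two passes (extremum, then filter) by one loop maintaining the best value
-- and the candidate list (objective: alternative, same cost).

-- ===== PORT A =====
-- A: poin_diminta = max/min of the values, then one filter pass appending matching items.
def juara (daftar_pemain : List (String × Int)) (action : Int) : List (String × Int) :=
  let poin_diminta :=
    if action == 1 then PySem.List.max? (daftar_pemain.map Prod.snd) (fun y => y)
    else PySem.List.min? (daftar_pemain.map Prod.snd) (fun y => y)
  match poin_diminta with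
  | none => []   -- unreachable under Pre_juara: Python raises ValueError on an empty dict
  | some p =>
      daftar_pemain.foldl
        (fun kandidat personnel =>
          if personnel.2 == p then kandidat ++ [personnel] else kandidat) []

-- ===== PORT B =====
-- 'best < v if action == 1 else v < best' from Source B, as a named helper
def pvBeats (action v b : Int) : Bool :=
  if action == 1 then decide (b < v) else decide (v < b)

def juara_alt (daftar_pemain : List (String × Int)) (action : Int) : List (String × Int) :=
  (daftar_pemain.foldl
    (fun (st : Option Int × List (String × Int)) kv =>
      match st.1 with
      | none => (some kv.2, [kv])
      | some b =>
          if pvBeats action kv.2 b then (some kv.2, [kv])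
          else if kv.2 == b then (some b, st.2 ++ [kv])
          else st)
    (none, [])).2
  -- on the empty list the fold stays at (none, []): Python B raises ValueError there (outside Pre_)

-- ===== PRECONDITION & SPEC =====
-- Pre_ excludes only the empty dict, on which A's max()/min() raises ValueError (B also raises).
def Pre_juara (daftar_pemain : List (String × Int)) (action : Int) : Prop := daftar_pemain ≠ []
instance (daftar_pemain : List (String × Int)) (action : Int) : Decidable (Pre_juara daftar_pemain action) := by unfold Pre_juara; infer_instance
def pvWitness_juara : (List (String × Int)) × Int := ([("a", 3), ("b", 3), ("c", 1)], 1)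
def Spec_juara (daftar_pemain : List (String × Int)) (action : Int) (out : List (String × Int)) : Prop := out = juara_alt daftar_pemain action
instance (daftar_pemain : List (String × Int)) (action : Int) (out : List (String × Int)) : Decidable (Spec_juara daftar_pemain action out) := by unfold Spec_juara; infer_instance

-- ===== CLAIM (what is proved, stated in full; the proofs are below) =====
def Claim_equal_juara : Prop := ∀ (daftar_pemain : List (String × Int)) (action : Int), Dom_juara daftar_pemain action → Pre_juara daftar_pemain action → Spec_juara daftar_pemain action (juara daftar_pemain action)

-- ===== LEMMAS AND PROOFS =====

-- running extremum, in terms of pvBeats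
def pvExt (action b v : Int) : Int := if pvBeats action v b then v else b

theorem pvBeats_ne {action v b : Int} (h : pvBeats action v b = true) : v ≠ b := by
  unfold pvBeats at h; split at h <;>simp at h <;> omega

theorem pvBeats_irrefl (action b : Int) : pvBeats action b b = false := by
  unfold pvBeats; split <;> simp

theorem pvBeats_total {action v b : Int} (h : pvBeats action v b = false) (hne : v ≠ b) :
    pvBeats action b v = true := by
  unfold pvBeats at h ⊢; split at h <;> simp_all <;> omega

theorem pvBeats_trans {action u v w : Int} (h1 : pvBeats action u v = true)
    (h2 : pvBeats action v w = true) : pvBeats action u w = true := by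
  unfold pvBeats at h1 h2 ⊢; split at h1 <;> simp_all <;> omega

-- the final extremum beats or equals any intermediate best
theorem foldl_ext_ge (action : Int) :
    ∀ (l : List (String × Int)) (b : Int),
      pvBeats action (l.foldl (fun m kv => pvExt action m kv.2) b) b = true ∨
      l.foldl (fun m kv => pvExt action m kv.2) b = b := by
  intro l
  induction l with
  | nil => intro b; right; rfl
  | cons kv l ih =>
    intro b
    simp only [List.foldl_cons]
    by_cases hb : pvBeats action kv.2 b = true
    · have hext : pvExt action b kv.2 = kv.2 := by unfold pvExt; simp [hb]
      rw [hext]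
      rcases ih kv.2 with h | h
      · left; exact pvBeats_trans h hb
      · left; rw [h]; exact hb
    · have hext : pvExt action b kv.2 = b := by unfold pvExt; simp [hb]
      rw [hext]; exact ih b

-- loop invariant for B's single pass
theorem foldB (action : Int) :
    ∀ (l : List (String × Int)) (b : Int) (acc : List (String × Int)),
      l.foldl
        (fun (st : Option Int × List (String × Int)) kv =>
          match st.1 with
          | none => (some kv.2, [kv])
          | some b =>
              if pvBeats action kv.2 b then (some kv.2, [kv])
              else if kv.2 == b then (some b, st.2 ++ [kv])
              else st)
        (some b, acc)
      = (some (l.foldl (fun m kv => pvExt action m kv.2) b),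
         if pvBeats action (l.foldl (fun m kv => pvExt action m kv.2) b) b
         then l.filter (fun kv => kv.2 == l.foldl (fun m kv => pvExt action m kv.2) b)
         else acc ++ l.filter (fun kv => kv.2 == b)) := by
  intro l
  induction l with
  | nil => intro b acc; simp [pvBeats_irrefl]
  | cons kv l ih =>
    intro b acc
    simp only [List.foldl_cons]
    by_cases hb : pvBeats action kv.2 b = true
    · have hext : pvExt action b kv.2 = kv.2 := by unfold pvExt; simp [hb]
      simp only [hb, if_true, hext]
      rw [ih kv.2 [kv]]
      have hM := foldl_ext_ge action l kv.2
      generalize hMg : List.foldl (fun m kv => pvExt action m kv.2) kv.2 l = M at hM ⊢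
      have hMb : pvBeats action M b = true := by
        rcases hM with h | h
        · exact pvBeats_trans h hb
        · rw [h]; exact hb
      rw [hMb]
      simp only [if_true]
      rcases hM with h | h
      · have hne : (kv.2 == M) = false := by
          simp only [beq_eq_false_iff_ne]
          exact fun he => pvBeats_ne h he.symm
        rw [h, List.filter_cons, hne]
        simp
      · subst h
        rw [pvBeats_irrefl, List.filter_cons]
        simp
    · simp only [Bool.not_eq_true] at hb
      have hext : pvExt action b kv.2 = b := by unfold pvExt; simp [hb]
      simp only [hb, Bool.false_eq_true, if_false, hext]
      by_cases he : kv.2 = b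
      · simp only [he, beq_self_eq_true, if_true]
        rw [ih b (acc ++ [kv])]
        have hM := foldl_ext_ge action l b
        generalize hMg : List.foldl (fun m kv => pvExt action m kv.2) b l = M at hM ⊢
        by_cases hMb : pvBeats action M b = true
        · have hne : (kv.2 == M) = false := by
            simp only [beq_eq_false_iff_ne, he]
            exact fun h2 => pvBeats_ne hMb h2.symm
          rw [hMb, List.filter_cons, hne]
          simp
        · simp only [Bool.not_eq_true] at hMb
          rw [hMb]
          simp [he]
      · have hbeq : (kv.2 == b) = false := by simp [he]
        simp only [hbeq, Bool.false_eq_true, if_false]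
        rw [ih b acc]
        have hM := foldl_ext_ge action l b
        generalize hMg : List.foldl (fun m kv => pvExt action m kv.2) b l = M at hM ⊢
        by_cases hMb : pvBeats action M b = true
        · have hbk : pvBeats action b kv.2 = true := pvBeats_total hb he
          have hne : (kv.2 == M) = false := by
            simp only [beq_eq_false_iff_ne]
            exact fun h2 => pvBeats_ne (pvBeats_trans hMb hbk) h2.symm
          rw [hMb, List.filter_cons, hne]
          simp
        · simp only [Bool.not_eq_true] at hMb
          rw [hMb]
          simp only [Bool.false_eq_true, if_false, List.filter_cons, hbeq]

-- A's extremum equals the running pvExt fold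
theorem ext_fold_eq (action : Int) (x : Int) (vs : List (String × Int)) :
    (if action == 1 then PySem.List.max? (x :: vs.map Prod.snd) (fun y => y)
     else PySem.List.min? (x :: vs.map Prod.snd) (fun y => y))
    = some (vs.foldl (fun m kv => pvExt action m kv.2) x) := by
  by_cases h : action = 1
  · simp only [h, beq_self_eq_true, if_true, PySem.List.max?_id_cons, List.foldl_map]
    congr 1
    apply List.foldl_ext
    intro m kv _
    unfold pvExt pvBeats
    simp only [beq_self_eq_true, if_true]
    by_cases h2 : m < kv.2 <;> simp [h2] <;> omega
  · have hb : (action == 1) = false := by simp [h]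
    simp only [hb, if_false, Bool.false_eq_true, PySem.List.min?_id_cons, List.foldl_map]
    congr 1
    apply List.foldl_ext
    intro m kv _
    unfold pvExt pvBeats
    simp only [hb, if_false, Bool.false_eq_true]
    by_cases h2 : kv.2 < m <;> simp [h2] <;> omega

-- ===== VERDICT (by name: the statement is the Claim_ definition above) =====
theorem juara_spec : Claim_equal_juara := by
  intro d action _ hpre
  unfold Spec_juara juara juara_alt
  match d with
  | [] => exact absurd rfl hpre
  | x :: t =>
    simp only [List.map_cons, List.foldl_cons]
    rw [ext_fold_eq action x.2 t]
    rw [foldB action t x.2 [x]]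
    set M := t.foldl (fun m kv => pvExt action m kv.2) x.2 with hM
    simp only []
    rw [PySem.List.foldl_append_if_eq_filter]
    by_cases hMb : pvBeats action M x.2 = true
    · have hne : (x.2 == M) = false := by
        simp only [beq_eq_false_iff_ne]; exact fun h2 => pvBeats_ne hMb h2.symm
      simp [hMb, hne]
    · have hMx : M = x.2 := by
        rcases foldl_ext_ge action t x.2 with h | h
        · exact absurd h hMb
        · exact h
      simp [hMx, pvBeats_irrefl]
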